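-- pv_equiv track=rewrite | github.com/lnarmour/simplifying-reductions | simplify/simplify.py | d_ary
-- ===== SOURCE A (Python) =====
-- def d_ary(d, n):
--     if n == 0:
--         return '0'
--     nums = []
--     while n:
--         n, r = divmod(n, d)
--         nums.append(str(r))
--     return ''.join(reversed(nums))
-- ===== SOURCE B (Python) =====
-- def d_ary(d, n):
--     if n == 0:
--         return '0'
--     def helper(m):
--         if m == 0:
--             return ''
--         return helper(m // d) + str(m % d)
--     return helper(n)
-- ===== Notes on version B (the rewrite author's own statement) =====
-- stated objective: simpler
-- what changed: Replaces the explicit digit list built LSB-first in a while loop and then reversed-and-joined by a recursion on the quotient that appends the least-significant digit on the way back up, so no list, no reversal and no join are needed.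
import Mathlib
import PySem

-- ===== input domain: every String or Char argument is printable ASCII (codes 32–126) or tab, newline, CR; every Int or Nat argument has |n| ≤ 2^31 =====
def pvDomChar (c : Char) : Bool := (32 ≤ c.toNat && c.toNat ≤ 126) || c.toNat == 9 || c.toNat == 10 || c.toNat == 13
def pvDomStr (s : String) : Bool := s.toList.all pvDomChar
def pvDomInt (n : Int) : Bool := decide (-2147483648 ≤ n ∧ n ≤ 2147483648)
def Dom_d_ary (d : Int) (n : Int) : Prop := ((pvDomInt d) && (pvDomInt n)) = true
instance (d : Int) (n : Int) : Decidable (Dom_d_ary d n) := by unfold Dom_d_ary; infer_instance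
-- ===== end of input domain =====

-- B replaces A's digit list built least-significant-first in a while loop and then
-- reversed and joined by a recursion on the quotient that appends the digit on the
-- way back up, so no list, no reversal and no join are needed (objective: simpler).

-- ===== PORT A =====
-- the while loop; fuel is a totality guard only: within Dom (|n| ≤ 2^31, Pre_ bases)
-- the loop runs at most 33 iterations, so fuel 100 is never exhausted there
def dAryLoop (fuel : Nat) (d : Int) (n : Int) (nums : List String) : List String :=
  match fuel with
  | 0 => nums
  | fuel + 1 =>
    if n = 0 then nums                      -- while n:  (falsy ↔ n == 0)
    else
      match PySem.Int.divmod? n d with      -- n, r = divmod(n, d)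
      | none => nums                        -- d = 0: ZeroDivisionError, excluded by Pre_
      | some (n', r) => dAryLoop fuel d n' (nums ++ [PySem.Int.toStr r])  -- nums.append(str(r))

def d_ary (d : Int) (n : Int) : String :=
  if n = 0 then "0"
  else PySem.Str.join "" (dAryLoop 100 d n []).reverse   -- ''.join(reversed(nums))

-- ===== PORT B =====
-- helper(m) = '' if m == 0 else helper(m // d) + str(m % d); same fuel remark as above
def dAryHelper (fuel : Nat) (d : Int) (m : Int) : String :=
  match fuel with
  | 0 => ""
  | fuel + 1 =>
    if m = 0 then ""
    else dAryHelper fuel d (PySem.Int.floordiv m d) ++ PySem.Int.toStr (PySem.Int.mod m d)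

def d_ary_alt (d : Int) (n : Int) : String :=
  if n = 0 then "0" else dAryHelper 100 d n

-- ===== PRECONDITION & SPEC =====
-- Pre_ excludes only inputs on which A never returns: d = 0 with n ≠ 0 raises
-- ZeroDivisionError, and d ∈ {1, -1} with n ≠ 0 or d ≥ 2 with n < 0 loop forever.
def Pre_d_ary (d : Int) (n : Int) : Prop := n = 0 ∨ (2 ≤ d ∧ 1 ≤ n) ∨ d ≤ -2
instance (d : Int) (n : Int) : Decidable (Pre_d_ary d n) := by unfold Pre_d_ary; infer_instance

def pvWitness_d_ary : Int × Int := (2, 5)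

def Spec_d_ary (d : Int) (n : Int) (out : String) : Prop := out = d_ary_alt d n
instance (d : Int) (n : Int) (out : String) : Decidable (Spec_d_ary d n out) := by unfold Spec_d_ary; infer_instance

-- ===== CLAIM (what is proved, stated in full; the proofs are below) =====
def Claim_equal_d_ary : Prop := ∀ (d : Int) (n : Int), Dom_d_ary d n → Pre_d_ary d n → Spec_d_ary d n (d_ary d n)

-- ===== LEMMAS AND PROOFS =====
theorem str_toList_inj (a b : String) (hab : a.toList = b.toList) : a = b := by
  have := congrArg String.ofList hab
  simpa using this

theorem join_empty_nil : PySem.Str.join "" ([] : List String) = "" := by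
  apply str_toList_inj
  simp [PySem.Chars.join_nil]

theorem join_empty_cons (s : String) (l : List String) :
    PySem.Str.join "" (s :: l) = s ++ PySem.Str.join "" l := by
  apply str_toList_inj
  cases l with
  | nil => simp [PySem.Chars.join_singleton, PySem.Chars.join_nil]
  | cons x xs => simp [PySem.Chars.join_cons_cons]

theorem loop_helper (fuel : Nat) : ∀ (d n : Int) (nums : List String), d ≠ 0 →
    PySem.Str.join "" (dAryLoop fuel d n nums).reverse
      = dAryHelper fuel d n ++ PySem.Str.join "" nums.reverse := by
  induction fuel with
  | zero =>
    intro d n nums hd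
    simp [dAryLoop, dAryHelper]
  | succ f ih =>
    intro d n nums hd
    by_cases hn : n = 0
    · simp [dAryLoop, dAryHelper, hn]
    · simp only [dAryLoop, dAryHelper, if_neg hn]
      have hdm : PySem.Int.divmod? n d
          = some (PySem.Int.floordiv n d, PySem.Int.mod n d) := by
        simp [PySem.Int.divmod?, PySem.Int.floordiv, PySem.Int.mod, hd]
      rw [hdm]
      rw [ih d (PySem.Int.floordiv n d) (nums ++ [PySem.Int.toStr (PySem.Int.mod n d)]) hd]
      rw [List.reverse_append]
      simp [join_empty_cons, String.append_assoc]

-- ===== VERDICT (by name: the statement is the Claim_ definition above) =====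
theorem d_ary_spec : Claim_equal_d_ary := by
  intro d n _ hpre
  unfold Spec_d_ary
  by_cases hn : n = 0
  · simp [d_ary, d_ary_alt, hn]
  · have hd : d ≠ 0 := by
      rcases hpre with h | h | h <;> omega
    simp only [d_ary, d_ary_alt, if_neg hn]
    rw [loop_helper 100 d n [] hd]
    simp [join_empty_nil]
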